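-- pv_equiv track=rewrite | github.com/SmartDude04/advent-of-code-2023 | day-12/day-12-1.py | check_valid_combination
-- ===== SOURCE A (Python) =====
-- def check_valid_combination(springs, groups) -> bool:
--     checked_groups = []
--     on_group = False
--
--     for i, char in enumerate(springs):
--         if char == "#":
--             if not on_group:
--                 checked_groups.append(1)
--                 on_group = True
--             else:
--                 checked_groups[-1] += 1
--         else:
--             on_group = False
--
--     return checked_groups == groups
-- ===== SOURCE B (Python) =====
-- def check_valid_combination(springs, groups) -> bool:
--     # Match groups against the string by consuming it: for each expected group,
--     # skip separators, require a run of exactly that many '#'s; finally no '#' may remain.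
--     def go(s, gs):
--         if not gs:
--             return all(c != "#" for c in s)
--         i = 0
--         while i < len(s) and s[i] != "#":
--             i += 1
--         if i == len(s):
--             return False
--         j = i
--         while j < len(s) and s[j] == "#":
--             j += 1
--         if j - i != gs[0]:
--             return False
--         return go(s[j:], gs[1:])
--     return go(springs, groups)
-- ===== Notes on version B (the rewrite author's own statement) =====
-- stated objective: alternative
-- what changed: Instead of building the run-length list and comparing it to groups, B is a recursive matcher that consumes the string against groups: skip separators, demand a run of exactly gs[0] '#'s, recurse on the rest, and finally require no '#' left; it can stop early on the first mismatch.
import Mathlib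
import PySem

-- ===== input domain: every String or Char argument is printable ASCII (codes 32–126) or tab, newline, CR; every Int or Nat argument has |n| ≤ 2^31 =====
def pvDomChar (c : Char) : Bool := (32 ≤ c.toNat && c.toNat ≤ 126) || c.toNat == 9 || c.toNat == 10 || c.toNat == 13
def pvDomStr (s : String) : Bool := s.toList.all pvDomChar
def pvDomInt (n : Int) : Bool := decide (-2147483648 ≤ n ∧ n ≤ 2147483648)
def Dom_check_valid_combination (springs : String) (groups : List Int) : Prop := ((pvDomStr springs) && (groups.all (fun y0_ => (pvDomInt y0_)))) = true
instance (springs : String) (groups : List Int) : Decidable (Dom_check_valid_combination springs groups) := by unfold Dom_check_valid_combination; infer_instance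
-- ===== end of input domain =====

-- B replaces A's run-list construction + comparison by a recursive matcher that
-- consumes the string against the groups (skip separators, demand an exact run,
-- recurse), stopping at the first mismatch (alternative decomposition).


-- ===== PORT A =====
-- checked_groups[-1] += 1 (list is nonempty whenever A reaches that line)
def pvIncLast : List Int → List Int
  | [] => []
  | [x] => [x + 1]
  | x :: xs => x :: pvIncLast xs

-- one iteration of A's for-loop over (checked_groups, on_group)
def pvStepA (st : List Int × Bool) (c : Char) : List Int × Bool :=
  if c = '#' then
    if st.2 = false then (st.1 ++ [1], true) else (pvIncLast st.1, true)
  else (st.1, false)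

def check_valid_combination (springs : String) (groups : List Int) : Bool :=
  (springs.toList.foldl pvStepA ([], false)).1 == groups

-- ===== PORT B =====
-- B's inner 'go': the two while-loops are List.dropWhile / List.takeWhile on the
-- character list; recursion is on the remaining groups, as in Source B.
def pvGo : List Int → List Char → Bool
  | [], s => s.all (fun c => !decide (c = '#'))
  | g :: gs, s =>
    let t := s.dropWhile (fun c => !decide (c = '#'))
    if t.isEmpty then false
    else
      let r := t.takeWhile (fun c => decide (c = '#'))
      if ((r.length : Int)) ≠ g then false
      else pvGo gs (t.drop r.length)

def check_valid_combination_alt (springs : String) (groups : List Int) : Bool :=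
  pvGo groups springs.toList

-- ===== PRECONDITION & SPEC =====
def Spec_check_valid_combination (springs : String) (groups : List Int) (out : Bool) : Prop := out = check_valid_combination_alt springs groups
instance (springs : String) (groups : List Int) (out : Bool) : Decidable (Spec_check_valid_combination springs groups out) := by unfold Spec_check_valid_combination; infer_instance

-- ===== CLAIM (what is proved, stated in full; the proofs are below) =====
def Claim_equal_check_valid_combination : Prop := ∀ (springs : String) (groups : List Int), Dom_check_valid_combination springs groups → Spec_check_valid_combination springs groups (check_valid_combination springs groups)

-- ===== LEMMAS AND PROOFS =====

-- reference run-length functions (right recursive): pvG cs = lengths of the maximal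
-- '#'-runs of cs; pvH n cs = the same, the current '#'-run having length n already
mutual
def pvG : List Char → List Int
  | [] => []
  | c :: cs => if c = '#' then pvH 1 cs else pvG cs
def pvH (n : Int) : List Char → List Int
  | [] => [n]
  | c :: cs => if c = '#' then pvH (n + 1) cs else n :: pvG cs
end

theorem pvIncLast_append (acc : List Int) (n : Int) :
    pvIncLast (acc ++ [n]) = acc ++ [n + 1] := by
  induction acc with
  | nil => rfl
  | cons x xs ih =>
    cases xs with
    | nil => simp [pvIncLast]
    | cons y ys => simpa [pvIncLast] using ih

-- A-side: the fold computes pvG / pvH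
theorem pvFoldA (cs : List Char) :
    (∀ acc, (cs.foldl pvStepA (acc, false)).1 = acc ++ pvG cs) ∧
    (∀ acc n, (cs.foldl pvStepA (acc ++ [n], true)).1 = acc ++ pvH n cs) := by
  induction cs with
  | nil => exact ⟨fun acc => by simp [pvG], fun acc n => by simp [pvH]⟩
  | cons c cs ih =>
    refine ⟨fun acc => ?_, fun acc n => ?_⟩
    · by_cases hc : c = '#'
      · have := ih.2 acc 1
        simp only [List.foldl_cons, pvStepA, hc] at this ⊢
        simpa [pvG, hc] using this
      · have := ih.1 acc
        simp only [List.foldl_cons, pvStepA, hc] at this ⊢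
        simpa [pvG, hc] using this
    · by_cases hc : c = '#'
      · have := ih.2 acc (n + 1)
        simp only [List.foldl_cons, pvStepA, hc] at this ⊢
        simpa [pvH, hc, pvIncLast_append] using this
      · have := ih.1 (acc ++ [n])
        simp only [List.foldl_cons, pvStepA, hc] at this ⊢
        simpa [pvH, hc, List.append_assoc] using this

-- pvG ignores a non-'#' prefix
theorem pvG_dropWhile (cs : List Char) :
    pvG cs = pvG (cs.dropWhile (fun c => !decide (c = '#'))) := by
  induction cs with
  | nil => rfl
  | cons c cs ih =>
    by_cases hc : c = '#'
    · rw [List.dropWhile_cons_of_neg (by simp [hc])]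
    · rw [List.dropWhile_cons_of_pos (by simp [hc])]
      rw [show pvG (c :: cs) = pvG cs by simp [pvG, hc]]
      exact ih

-- pvH peels off the rest of the current run
theorem pvH_run (cs : List Char) : ∀ n : Int,
    pvH n cs = (n + ((cs.takeWhile (fun c => decide (c = '#'))).length : Int))
      :: pvG (cs.drop (cs.takeWhile (fun c => decide (c = '#'))).length) := by
  induction cs with
  | nil => intro n; simp [pvH, pvG]
  | cons c cs ih =>
    intro n
    by_cases hc : c = '#'
    · rw [show pvH n (c :: cs) = pvH (n + 1) cs by simp [pvH, hc], ih (n + 1),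
        List.takeWhile_cons_of_pos (by simp [hc])]
      simp only [List.length_cons, List.drop_succ_cons]
      congr 1
      push_cast
      ring
    · rw [List.takeWhile_cons_of_neg (by simp [hc])]
      simp [pvH, hc]
      exact (show pvG (c :: cs) = pvG cs by simp [pvG, hc]).symm

-- pvG is [] exactly when there is no '#'
theorem pvG_nil_iff (cs : List Char) :
    (pvG cs = []) ↔ cs.all (fun c => !decide (c = '#')) = true := by
  induction cs with
  | nil => simp [pvG]
  | cons c cs ih =>
    by_cases hc : c = '#'
    · rw [show pvG (c :: cs) = pvH 1 cs by simp [pvG, hc]]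
      cases cs with
      | nil => simp [pvH, hc]
      | cons d ds =>
        constructor
        · intro h
          exfalso
          revert h
          rw [pvH_run]
          exact fun h => List.cons_ne_nil _ _ h
        · intro h; simp [hc] at h
    · rw [show pvG (c :: cs) = pvG cs by simp [pvG, hc]]
      simp [ih, hc]

-- the first element surviving dropWhile fails the predicate
theorem pvDropWhileHead (p : Char → Bool) (s : List Char) (d : Char) (ds : List Char)
    (h : s.dropWhile p = d :: ds) : p d = false := by
  induction s with
  | nil => cases h
  | cons c cs ih =>
    by_cases hc : p c = true
    · exact ih (by rwa [List.dropWhile_cons_of_pos hc] at h)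
    · rw [List.dropWhile_cons_of_neg hc] at h
      cases h
      simpa using hc

-- B-side: the matcher decides "pvG s = gs"
theorem pvGo_eq (gs : List Int) : ∀ s : List Char, pvGo gs s = (pvG s == gs) := by
  induction gs with
  | nil =>
    intro s
    rcases h : pvG s with _ | ⟨x, xs⟩
    · rw [show pvGo [] s = s.all (fun c => !decide (c = '#')) from rfl,
        (pvG_nil_iff s).mp h]
      simp
    · have hall : ¬ s.all (fun c => !decide (c = '#')) = true := fun hall => by
        have := (pvG_nil_iff s).mpr hall; rw [h] at this; cases this
      rw [show pvGo [] s = s.all (fun c => !decide (c = '#')) from rfl]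
      simp [hall]
  | cons g gs ih =>
    intro s
    rw [show pvG s = pvG (s.dropWhile (fun c => !decide (c = '#'))) from pvG_dropWhile s]
    rw [show pvGo (g :: gs) s =
        (let t := s.dropWhile (fun c => !decide (c = '#'));
         if t.isEmpty then false
         else
           let r := t.takeWhile (fun c => decide (c = '#'))
           if ((r.length : Int)) ≠ g then false
           else pvGo gs (t.drop r.length)) from rfl]
    cases h : s.dropWhile (fun c => !decide (c = '#')) with
    | nil => simp [pvG]
    | cons d ds =>
      have hd : d = '#' := by
        have := pvDropWhileHead (fun c => !decide (c = '#')) s d ds h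
        simpa using this
      subst hd
      rw [show pvG ('#' :: ds) = pvH 1 ds by simp [pvG], pvH_run]
      have htake : (('#' :: ds).takeWhile (fun c => decide (c = '#')))
          = '#' :: ds.takeWhile (fun c => decide (c = '#')) :=
        List.takeWhile_cons_of_pos (by simp)
      simp only [List.isEmpty_cons, htake, List.length_cons, List.drop_succ_cons,
        if_neg Bool.false_ne_true, ih, List.cons_beq_cons]
      by_cases hg : (1 + ((ds.takeWhile (fun c => decide (c = '#'))).length : Int)) = g
      · rw [if_neg (by push_cast; omega)]
        have hbeq : (1 + ((ds.takeWhile (fun c => decide (c = '#'))).length : Int) == g) = true := by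
          simp [hg]
        rw [hbeq, Bool.true_and]
      · rw [if_pos (by push_cast; omega)]
        have hbeq : (1 + ((ds.takeWhile (fun c => decide (c = '#'))).length : Int) == g) = false := by
          simp [hg]
        rw [hbeq, Bool.false_and]

-- ===== VERDICT (by name: the statement is the Claim_ definition above) =====
theorem check_valid_combination_spec : Claim_equal_check_valid_combination := by
  intro springs groups _
  unfold Spec_check_valid_combination check_valid_combination check_valid_combination_alt
  have hA := (pvFoldA springs.toList).1 []
  simp only [List.nil_append] at hA
  rw [hA, pvGo_eq]
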